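-- pv_equiv track=rewrite | github.com/tmargary/ProblemSolving | other/count_1_bits_odd_or_even.py | solution
-- ===== SOURCE A (Python) =====
-- def solution(x):
--     cnt = 0
--     x = abs(x)  # because in Python, -1 is '-0b1'. Check with bin(-1)
--     while x != 0:
--         if x & 1 == 1:  # if number is odd, meaning the 1 bit is at the first position, ready for removal
--             cnt += 1
--         x = x >> 1
--
--     if cnt & 1 == 1:
--         return 'odd'
--     elif cnt == 0:
--         return 'none'
--     else:
--         return 'even'
-- ===== SOURCE B (Python) =====
-- _PARITY = (0, 1, 1, 0, 1, 0, 0, 1, 1, 0, 0, 1, 0, 1, 1, 0)  # parity of the popcount of each nibble 0..15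
--
-- def solution(x):
--     # Early 'none' (only x == 0 has no set bits), then a nibble-table parity
--     # fold: xor-accumulate the precomputed parity of 4 bits per iteration.
--     if x == 0:
--         return 'none'
--     x = abs(x)
--     odd = 0
--     while x:
--         odd ^= _PARITY[x & 15]
--         x >>= 4
--     return 'odd' if odd else 'even'
-- ===== Notes on version B (the rewrite author's own statement) =====
-- stated objective: alternative
-- what changed: Replaces A's per-bit shift-and-count loop plus final count classification with an early 'none' return for 0 and a nibble-at-a-time parity fold using a precomputed 16-entry parity table and an xor accumulator (no counter at all).
import Mathlib
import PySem

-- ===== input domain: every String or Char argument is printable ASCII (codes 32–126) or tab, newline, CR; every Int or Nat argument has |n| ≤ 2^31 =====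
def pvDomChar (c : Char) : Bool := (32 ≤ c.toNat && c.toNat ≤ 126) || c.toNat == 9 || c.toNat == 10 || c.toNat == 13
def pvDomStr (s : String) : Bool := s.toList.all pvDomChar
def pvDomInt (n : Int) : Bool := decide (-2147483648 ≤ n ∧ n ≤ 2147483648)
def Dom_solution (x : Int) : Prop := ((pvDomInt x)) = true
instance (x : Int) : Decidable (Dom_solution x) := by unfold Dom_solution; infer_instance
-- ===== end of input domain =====

-- B replaces A's per-bit counting loop with an early 'none' for 0 and a
-- nibble-table xor parity fold; same return value everywhere.

-- ===== PORT A =====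
-- A's while loop over x = abs(x): test the low bit, count it, shift right by one.
def pvCountA (n : Nat) : Nat :=
  if _h : n = 0 then 0
  else (if n &&& 1 = 1 then 1 else 0) + pvCountA (n >>> 1)
decreasing_by simp [Nat.shiftRight_one]; omega

def solution (x : Int) : String :=
  let cnt := pvCountA x.natAbs
  if cnt &&& 1 = 1 then "odd"
  else if cnt = 0 then "none"
  else "even"

-- ===== PORT B =====
-- the 16-entry nibble-parity table _PARITY
def pvParityTbl : List Nat := [0, 1, 1, 0, 1, 0, 0, 1, 1, 0, 0, 1, 0, 1, 1, 0]

-- B's while loop: xor the table entry for the low nibble, shift right by four.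
-- (the index x &&& 15 is always < 16, so List.getD is exact for _PARITY[x & 15])
def pvOddB (x : Nat) (odd : Nat) : Nat :=
  if _h : x = 0 then odd
  else pvOddB (x >>> 4) (odd ^^^ pvParityTbl.getD (x &&& 15) 0)
decreasing_by simp [Nat.shiftRight_eq_div_pow]; omega

def solution_alt (x : Int) : String :=
  if x = 0 then "none"
  else if pvOddB x.natAbs 0 ≠ 0 then "odd" else "even"

-- ===== PRECONDITION & SPEC =====
def Spec_solution (x : Int) (out : String) : Prop := out = solution_alt x
instance (x : Int) (out : String) : Decidable (Spec_solution x out) := by unfold Spec_solution; infer_instance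

-- ===== CLAIM (what is proved, stated in full; the proofs are below) =====
def Claim_equal_solution : Prop := ∀ (x : Int), Dom_solution x → Spec_solution x (solution x)

-- ===== LEMMAS AND PROOFS =====

theorem pvCountA_step (n : Nat) : pvCountA n = n % 2 + pvCountA (n / 2) := by
  rcases Nat.eq_zero_or_pos n with rfl | h
  · simp [pvCountA]
  · rw [pvCountA]
    simp only [dif_neg (by omega : ¬ n = 0), Nat.and_one_is_mod, Nat.shiftRight_one]
    rcases Nat.mod_two_eq_zero_or_one n with h2 | h2 <;> simp [h2]

theorem pvCountA_pos (n : Nat) (h : n ≠ 0) : 0 < pvCountA n := by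
  induction n using Nat.strong_induction_on with
  | _ n ih =>
    rw [pvCountA_step]
    rcases Nat.mod_two_eq_zero_or_one n with h2 | h2
    · have : n / 2 ≠ 0 := by omega
      have := ih (n / 2) (by omega) this
      omega
    · omega

theorem pvCountA_split (n : Nat) :
    pvCountA n = pvCountA (n % 16) + pvCountA (n / 16) := by
  have e1 := pvCountA_step n
  have e2 := pvCountA_step (n / 2)
  have e3 := pvCountA_step (n / 2 / 2)
  have e4 := pvCountA_step (n / 2 / 2 / 2)
  have f1 := pvCountA_step (n % 16)
  have f2 := pvCountA_step (n % 16 / 2)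
  have f3 := pvCountA_step (n % 16 / 2 / 2)
  have f4 := pvCountA_step (n % 16 / 2 / 2 / 2)
  have g : n % 16 / 2 / 2 / 2 / 2 = 0 := by omega
  have g0 : pvCountA 0 = 0 := by simp [pvCountA]
  have h1 : n % 16 % 2 = n % 2 := by omega
  have h2 : n % 16 / 2 % 2 = n / 2 % 2 := by omega
  have h3 : n % 16 / 2 / 2 % 2 = n / 2 / 2 % 2 := by omega
  have h4 : n % 16 / 2 / 2 / 2 % 2 = n / 2 / 2 / 2 % 2 := by omega
  have h5 : n / 2 / 2 / 2 / 2 = n / 16 := by omega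
  rw [g, g0] at f4
  rw [h5] at e4
  omega

theorem pvCountA_zero : pvCountA 0 = 0 := by simp [pvCountA]

theorem pvCountA_by4 (m : Nat) :
    pvCountA m =
      m % 2 + m / 2 % 2 + m / 2 / 2 % 2 + m / 2 / 2 / 2 % 2 + pvCountA (m / 2 / 2 / 2 / 2) := by
  have e1 := pvCountA_step m
  have e2 := pvCountA_step (m / 2)
  have e3 := pvCountA_step (m / 2 / 2)
  have e4 := pvCountA_step (m / 2 / 2 / 2)
  omega

theorem xor_mod_two (a b : Nat) : a % 2 ^^^ b % 2 = (a + b) % 2 := by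
  rcases Nat.mod_two_eq_zero_or_one a with ha | ha <;>
    rcases Nat.mod_two_eq_zero_or_one b with hb | hb <;>
      [ (have h : (a + b) % 2 = 0 := by omega);
        (have h : (a + b) % 2 = 1 := by omega);
        (have h : (a + b) % 2 = 1 := by omega);
        (have h : (a + b) % 2 = 0 := by omega) ] <;>
      rw [ha, hb, h] <;> rfl

theorem pvParityTbl_eq (m : Nat) (h : m < 16) :
    pvParityTbl.getD m 0 = pvCountA m % 2 := by
  interval_cases m <;>
    rw [pvCountA_by4] <;> norm_num [pvParityTbl, pvCountA_zero]

theorem pvOddB_eq (n : Nat) (odd : Nat) :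
    pvOddB n odd = odd ^^^ pvCountA n % 2 := by
  induction n using Nat.strong_induction_on generalizing odd with
  | _ n ih =>
    rcases Nat.eq_zero_or_pos n with rfl | h
    · simp [pvOddB, pvCountA]
    · rw [pvOddB]
      simp only [dif_neg (by omega : ¬ n = 0)]
      have hlt : n >>> 4 < n := by
        simp only [Nat.shiftRight_eq_div_pow]; omega
      rw [ih _ hlt]
      have hmask : n &&& 15 = n % 16 := by
        have : (15 : Nat) = 2 ^ 4 - 1 := by norm_num
        rw [this, Nat.and_two_pow_sub_one_eq_mod]
      rw [hmask, pvParityTbl_eq _ (by omega),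
        Nat.shiftRight_eq_div_pow, Nat.xor_assoc, xor_mod_two]
      have : (pvCountA (n % 16) + pvCountA (n / 2 ^ 4)) % 2 = pvCountA n % 2 := by
        rw [pvCountA_split n]; norm_num
      rw [this]

-- ===== VERDICT (by name: the statement is the Claim_ definition above) =====
theorem solution_spec : Claim_equal_solution := by
  intro x _
  unfold Spec_solution solution solution_alt
  by_cases hx : x = 0
  · subst hx; simp [Int.natAbs_zero, pvCountA_zero]
  · have hn : x.natAbs ≠ 0 := by simpa using hx
    rw [pvOddB_eq, Nat.zero_xor]
    simp only [if_neg hx, Nat.and_one_is_mod]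
    rcases Nat.mod_two_eq_zero_or_one (pvCountA x.natAbs) with h2 | h2
    · have hp := pvCountA_pos _ hn
      have hne : pvCountA x.natAbs ≠ 0 := by omega
      simp [h2, hne]
    · simp [h2]
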